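-- pv_equiv track=rewrite | github.com/christinelinster/ls-py110 | lesson_1/spot_questions/spot_9.py | get_middle
-- ===== SOURCE A (Python) =====
-- def get_middle(word):
--     sorted_word = sorted([c for c in word if c.isalnum()])
--     final_middle = ''
--     for char in word:
--         if char.isalnum():
--             final_middle += sorted_word.pop(0)
--         else:
--             final_middle += char
--     return final_middle
-- ===== SOURCE B (Python) =====
-- def get_middle(word):
--     chars = list(word)
--     positions = [i for i, c in enumerate(chars) if c.isalnum()]
--     for pos, ch in zip(positions, sorted(c for c in chars if c.isalnum())):
--         chars[pos] = ch
--     return ''.join(chars)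
-- ===== Notes on version B (the rewrite author's own statement) =====
-- stated objective: faster
-- what changed: B precomputes the alnum index table in one pass and scatters the sorted characters back by position into a mutable char list, instead of interleaving an isalnum branch that pops from the front of the sorted list while concatenating strings.
import Mathlib
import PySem

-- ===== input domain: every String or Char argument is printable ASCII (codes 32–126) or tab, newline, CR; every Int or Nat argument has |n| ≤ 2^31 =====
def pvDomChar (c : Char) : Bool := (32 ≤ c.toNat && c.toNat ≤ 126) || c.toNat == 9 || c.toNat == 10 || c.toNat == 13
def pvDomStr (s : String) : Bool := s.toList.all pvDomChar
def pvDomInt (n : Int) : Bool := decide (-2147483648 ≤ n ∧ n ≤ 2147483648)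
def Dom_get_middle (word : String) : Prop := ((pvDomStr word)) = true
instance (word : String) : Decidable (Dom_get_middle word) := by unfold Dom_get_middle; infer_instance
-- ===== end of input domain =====

-- B builds an alnum index table and scatters the sorted characters back by position;
-- same return value as A, proved equal on the whole domain.


-- ===== PORT A =====
-- the 'for char in word' loop: state = (remaining sorted_word, output so far);
-- the [] branch is unreachable (sorted_word holds exactly one char per alnum char of word)
def pvALoop : List Char → List Char → List Char
  | [], _ => []
  | c :: cs, s =>
    if PySem.Chars.isalnum c then
      match s with
      | [] => []          -- unreachable: Python's pop(0) never sees an empty list here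
      | h :: t => h :: pvALoop cs t
    else c :: pvALoop cs s

def get_middle (word : String) : String :=
  let sorted_word := PySem.List.sorted (word.toList.filter (fun c => PySem.Chars.isalnum c)) (fun c => c) false
  String.mk (pvALoop word.toList sorted_word)

-- ===== PORT B =====
-- positions = [i for i, c in enumerate(chars) if c.isalnum()]
def pvPositions (l : List Char) (s : Int) : List Int :=
  (PySem.List.enumerate l s).filterMap (fun p => if PySem.Chars.isalnum p.2 then some p.1 else none)

-- chars[pos] = ch : positions are in-range nonnegative indices, so List.set pos.toNat is exact
def pvScatter (l : List Char) (pcs : List (Int × Char)) : List Char :=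
  pcs.foldl (fun r pc => r.set pc.1.toNat pc.2) l

def get_middle_alt (word : String) : String :=
  let chars := word.toList
  let positions := pvPositions chars 0
  let sorted_chars := PySem.List.sorted (chars.filter (fun c => PySem.Chars.isalnum c)) (fun c => c) false
  String.mk (pvScatter chars (positions.zip sorted_chars))

-- ===== PRECONDITION & SPEC =====
def Spec_get_middle (word : String) (out : String) : Prop := out = get_middle_alt word
instance (word : String) (out : String) : Decidable (Spec_get_middle word out) := by unfold Spec_get_middle; infer_instance

-- ===== CLAIM (what is proved, stated in full; the proofs are below) =====
def Claim_equal_get_middle : Prop := ∀ (word : String), Dom_get_middle word → Spec_get_middle word (get_middle word)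

-- ===== LEMMAS AND PROOFS =====

lemma pvPositions_shift : ∀ (l : List Char) (s : Int),
    pvPositions l (s + 1) = (pvPositions l s).map (· + 1) := by
  intro l
  induction l with
  | nil => intro s; simp [pvPositions]
  | cons c cs ih =>
    intro s
    simp only [pvPositions, PySem.List.enumerate_cons, List.filterMap_cons] at *
    by_cases h : PySem.Chars.isalnum c
    · simpa [h, add_comm, add_left_comm] using ih (s + 1)
    · simpa [h, add_comm, add_left_comm] using ih (s + 1)

lemma pvPositions_mem_le : ∀ (l : List Char) (s : Int) (i : Int), i ∈ pvPositions l s → s ≤ i := by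
  intro l
  induction l with
  | nil => intro s i h; simp [pvPositions] at h
  | cons c cs ih =>
    intro s i h
    simp only [pvPositions, PySem.List.enumerate_cons, List.filterMap_cons] at h
    by_cases hc : PySem.Chars.isalnum c
    · simp [hc] at h
      rcases h with h | h
      · omega
      · have := ih (s + 1) i (by simp [pvPositions]; exact h); omega
    · simp [hc] at h
      have := ih (s + 1) i (by simp [pvPositions]; exact h); omega

lemma pvScatter_shift : ∀ (ps : List Int) (ss : List Char) (a : Char) (l : List Char),
    (∀ i ∈ ps, 0 ≤ i) →
    pvScatter (a :: l) ((ps.map (· + 1)).zip ss) = a :: pvScatter l (ps.zip ss) := by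
  intro ps
  induction ps with
  | nil => intro ss a l _; simp [pvScatter]
  | cons p pr ih =>
    intro ss a l hpos
    cases ss with
    | nil => simp [pvScatter]
    | cons h t =>
      have hp : 0 ≤ p := hpos p (by simp)
      have hset : (a :: l).set (p + 1).toNat h = a :: l.set p.toNat h := by
        have : (p + 1).toNat = p.toNat + 1 := by omega
        simp [this]
      simp only [List.map_cons, List.zip_cons_cons, pvScatter, List.foldl_cons] at *
      rw [hset]
      exact ih t a (l.set p.toNat h) (fun i hi => hpos i (by simp [hi]))

lemma pvScatter_eq_aLoop : ∀ (l : List Char) (s : List Char),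
    s.length = (l.filter (fun c => PySem.Chars.isalnum c)).length →
    pvScatter l ((pvPositions l 0).zip s) = pvALoop l s := by
  intro l
  induction l with
  | nil => intro s _; simp [pvPositions, pvScatter, pvALoop]
  | cons c cs ih =>
    intro s hlen
    have hshift : pvPositions cs 1 = (pvPositions cs 0).map (· + 1) := by
      simpa using pvPositions_shift cs 0
    have hpos : ∀ i ∈ pvPositions cs 0, (0:Int) ≤ i := fun i hi => pvPositions_mem_le cs 0 i hi
    by_cases hc : PySem.Chars.isalnum c
    · -- alnum char: s is nonempty
      cases s with
      | nil => simp [hc] at hlen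
      | cons h t =>
        have hlen' : t.length = (cs.filter (fun c => PySem.Chars.isalnum c)).length := by
          simp [hc] at hlen; omega
        simp only [pvPositions, PySem.List.enumerate_cons, List.filterMap_cons, hc, if_pos, zero_add]
        have : pvScatter (c :: cs)
            (((0 : Int) :: (PySem.List.enumerate cs 1).filterMap
              (fun p => if PySem.Chars.isalnum p.2 then some p.1 else none)).zip (h :: t))
            = pvScatter (h :: cs) ((pvPositions cs 1).zip t) := by
          simp [pvScatter, pvPositions]
        rw [this, hshift, pvScatter_shift _ _ _ _ hpos, ih t hlen']
        simp [pvALoop, hc]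
    · have hlen' : s.length = (cs.filter (fun c => PySem.Chars.isalnum c)).length := by
        simpa [hc] using hlen
      have : pvPositions (c :: cs) 0 = pvPositions cs 1 := by
        simp [pvPositions, PySem.List.enumerate_cons, hc, zero_add]
      rw [this, hshift, pvScatter_shift _ _ _ _ hpos, ih s hlen']
      simp [pvALoop, hc]

-- ===== VERDICT (by name: the statement is the Claim_ definition above) =====
theorem get_middle_spec : Claim_equal_get_middle := by
  intro word _
  unfold Spec_get_middle get_middle get_middle_alt
  have h := pvScatter_eq_aLoop word.toList
    (PySem.List.sorted (word.toList.filter (fun c => PySem.Chars.isalnum c)) (fun c => c) false)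
    (by simp [PySem.List.length_sorted])
  simp [h]
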